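-- pv_equiv track=rewrite | github.com/marajet/CitationWizard | backend/quote_matching.py | bag_of_bigrams
-- ===== SOURCE A (Python) =====
-- def bag_of_bigrams(words: list[str]) -> dict[str, dict[str, list]]:
--     bigrams = dict()
--     previous = ""
--     for i in range(len(words)):
--         if previous in bigrams:
--             if words[i] in bigrams[previous]:
--                 # append location of bigram
--                 bigrams[previous][words[i]].append(i - 1)
--             else:
--                 bigrams[previous].update({words[i]: [i - 1]})
--         else:
--             bigrams[previous] = {words[i]: [i - 1]}
--         previous = words[i]
--
--     return bigrams
-- ===== SOURCE B (Python) =====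
-- def bag_of_bigrams(words: list[str]) -> dict[str, dict[str, list]]:
--     # group-by via staged comprehensions: build the (prev, word) pair list once,
--     # then collect, for each distinct prev and each distinct follower, all positions by scanning the pairs
--     pairs = [("" if i == 0 else words[i - 1], w) for i, w in enumerate(words)]
--     return {
--         p: {
--             w: [i - 1 for i, pw in enumerate(pairs) if pw == (p, w)]
--             for w in dict.fromkeys(w2 for p2, w2 in pairs if p2 == p)
--         }
--         for p in dict.fromkeys(p2 for p2, _ in pairs)
--     }
-- ===== Notes on version B (the rewrite author's own statement) =====
-- stated objective: alternative
-- what changed: B replaces A's single pass that mutates a nested dict with a threaded 'previous' variable by a staged group-by: it materialises the (prev, word) pair list once, then builds the result with nested comprehensions that dedup the keys and re-scan the pair list to collect each bigram's positions.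
import Mathlib
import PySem

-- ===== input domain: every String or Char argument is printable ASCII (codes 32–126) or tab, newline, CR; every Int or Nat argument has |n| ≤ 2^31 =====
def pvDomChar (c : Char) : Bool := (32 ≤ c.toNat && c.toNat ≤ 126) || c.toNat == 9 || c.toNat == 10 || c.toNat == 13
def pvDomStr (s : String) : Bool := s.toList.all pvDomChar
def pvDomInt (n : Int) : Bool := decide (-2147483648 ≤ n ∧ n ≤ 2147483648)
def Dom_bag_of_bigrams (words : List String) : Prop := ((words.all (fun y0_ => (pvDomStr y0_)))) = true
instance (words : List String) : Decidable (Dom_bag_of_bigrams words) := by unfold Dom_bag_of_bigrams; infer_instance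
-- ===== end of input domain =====

-- B replaces A's mutating single pass by a staged group-by over a materialised (prev, word)
-- pair list (dedup the keys, re-scan for positions): an alternative decomposition, not faster.

-- ===== PORT A =====
def bag_of_bigrams (words : List String) : List (String × List (String × List Int)) :=
  let st := (PySem.List.pyRange 0 (words.length : Int) 1).foldl
    (fun (st : PySem.Dict String (PySem.Dict String (List Int)) × String) i =>
      let bigrams := st.1
      let previous := st.2
      let w := PySem.List.pyGetD words i ""
      let bigrams' :=
        if bigrams.contains previous then
          if (bigrams.getD previous PySem.Dict.empty).contains w then
            -- append location of bigram (append into the stored list)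
            bigrams.insert previous
              ((bigrams.getD previous PySem.Dict.empty).insert w
                (((bigrams.getD previous PySem.Dict.empty).getD w []) ++ [i - 1]))
          else
            bigrams.insert previous
              ((bigrams.getD previous PySem.Dict.empty).insert w [i - 1])
        else
          bigrams.insert previous (PySem.Dict.ofList [(w, [i - 1])])
      (bigrams', w))
    (PySem.Dict.empty, "")
  st.1.items.map (fun kv => (kv.1, kv.2.items))

-- ===== PORT B =====
-- dict comprehensions keyed by dict.fromkeys-deduped (hence distinct) keys: an insertion-ordered
-- dict built from distinct keys IS the association list in that key order — exact here.
def bag_of_bigrams_alt (words : List String) : List (String × List (String × List Int)) :=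
  let pairs := (PySem.List.enumerate words 0).map
    (fun iw => ((if iw.1 == 0 then "" else PySem.List.pyGetD words (iw.1 - 1) ""), iw.2))
  (PySem.List.dedup (pairs.map (fun pw => pw.1))).map (fun p =>
    (p, (PySem.List.dedup ((pairs.filter (fun pw => pw.1 == p)).map (fun pw => pw.2))).map (fun w =>
      (w, ((PySem.List.enumerate pairs 0).filter (fun ipw => ipw.2 == (p, w))).map
            (fun ipw => ipw.1 - 1)))))

-- ===== PRECONDITION & SPEC =====
def Spec_bag_of_bigrams (words : List String) (out : List (String × List (String × List Int))) : Prop := out = bag_of_bigrams_alt words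
instance (words : List String) (out : List (String × List (String × List Int))) : Decidable (Spec_bag_of_bigrams words out) := by unfold Spec_bag_of_bigrams; infer_instance

-- ===== CLAIM (what is proved, stated in full; the proofs are below) =====
def Claim_equal_bag_of_bigrams : Prop := ∀ (words : List String), Dom_bag_of_bigrams words → Spec_bag_of_bigrams words (bag_of_bigrams words)

-- ===== LEMMAS AND PROOFS =====

theorem dict_modify_eq_insert {κ ν : Type} [BEq κ] (d : PySem.Dict κ ν) (k : κ) (d0 : ν) (f : ν → ν) :
    d.modify k d0 f = d.insert k (f (d.getD k d0)) := by
  simp [PySem.Dict.modify, PySem.Dict.insert, PySem.Dict.getD]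

theorem step_eq (d : PySem.Dict String (PySem.Dict String (List Int))) (prev w : String) (i : Int) :
    (if d.contains prev then
       if (d.getD prev PySem.Dict.empty).contains w then
         d.insert prev
           ((d.getD prev PySem.Dict.empty).insert w
             (((d.getD prev PySem.Dict.empty).getD w []) ++ [i - 1]))
       else
         d.insert prev ((d.getD prev PySem.Dict.empty).insert w [i - 1])
     else
       d.insert prev (PySem.Dict.ofList [(w, [i - 1])]))
    = d.modify prev PySem.Dict.empty (fun inner => inner.modify w [] (fun l => l ++ [i - 1])) := by
  rw [dict_modify_eq_insert, dict_modify_eq_insert]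
  by_cases h : d.contains prev = true
  · simp only [h, if_true]
    by_cases h2 : (d.getD prev PySem.Dict.empty).contains w = true
    · simp [h2]
    · simp only [Bool.not_eq_true] at h2
      rw [PySem.Dict.getD_of_not_contains _ _ h2]
      simp [h2]
  · simp only [Bool.not_eq_true] at h
    rw [PySem.Dict.getD_of_not_contains _ _ h]
    simp [h]
    rfl

-- zipping the lagged sequence: one step of the lag
theorem zip_lag (p w : String) (t : List String) :
    (p :: (w :: t).dropLast).zip (w :: t) = (p, w) :: ((w :: t.dropLast).zip t) := by
  cases t <;> simp [List.zip]

-- threading 'previous' through a fold over enumerate equals folding over the lagged zip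
theorem thread (g : PySem.Dict String (PySem.Dict String (List Int)) → Int → String → String →
      PySem.Dict String (PySem.Dict String (List Int))) :
    ∀ (ws : List String) (s : Int) (d : PySem.Dict String (PySem.Dict String (List Int))) (p : String),
    ((PySem.List.enumerate ws s).foldl (fun st iw => (g st.1 iw.1 st.2 iw.2, iw.2)) (d, p)).1
      = (PySem.List.enumerate ((p :: ws.dropLast).zip ws) s).foldl
          (fun d ipw => g d ipw.1 ipw.2.1 ipw.2.2) d := by
  intro ws
  induction ws with
  | nil => intro s d p; simp [PySem.List.enumerate_nil]
  | cons w t ih =>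
      intro s d p
      rw [zip_lag]
      rw [PySem.List.enumerate_cons, PySem.List.enumerate_cons]
      simp only [List.foldl_cons]
      exact ih (s + 1) (g d s p w) w

-- (k, xs[k]) is the k-th entry of enumerate
theorem getElem_enum {α : Type} (xs : List α) (s : Int) (k : Nat)
    (hk : k < xs.length) (h : k < (PySem.List.enumerate xs s).length) :
    (PySem.List.enumerate xs s)[k] = (s + k, xs[k]) := by
  induction xs generalizing s k with
  | nil => simp at hk
  | cons x t ih =>
      cases k with
      | zero => simp [PySem.List.enumerate_cons]
      | succ j =>
          simp only [PySem.List.enumerate_cons, List.getElem_cons_succ]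
          rw [ih (s + 1) j (by simpa using hk) (by simp [PySem.List.length_enumerate]; simpa using hk)]
          simp only [Prod.mk.injEq, and_true]
          push_cast; ring

-- B's pair list is the lagged zip
theorem pairs_eq (words : List String) :
    (PySem.List.enumerate words 0).map
        (fun iw => ((if iw.1 == 0 then "" else PySem.List.pyGetD words (iw.1 - 1) ""), iw.2))
      = ("" :: words.dropLast).zip words := by
  apply List.ext_getElem
  · simp [PySem.List.length_enumerate, List.length_zip]
    cases words <;> simp
  · intro k h1 h2
    have hk : k < words.length := by
      simpa [PySem.List.length_enumerate] using h1
    rw [List.getElem_map, getElem_enum words 0 k hk (by simpa [PySem.List.length_enumerate]),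
        List.getElem_zip]
    cases k with
    | zero => simp
    | succ j =>
        have hj : j < words.length - 1 := by
          simp [List.length_zip, List.length_dropLast] at h2
          omega
        simp only [List.getElem_cons_succ]
        have h0 : ((0 : Int) + (j + 1 : Nat) == 0) = false := by
          simp; omega
        rw [h0]
        have : (0 : Int) + ((j : Nat) + 1 : Nat) - 1 = ((j : Nat) : Int) := by push_cast; ring
        rw [if_neg (by simp), this, PySem.List.pyGetD_natCast]
        rw [List.getD_eq_getElem _ _ (by omega), List.getElem_dropLast]

-- the grouping fold, restricted to one outer key, is the fold over the filtered list
theorem getD_F (p : String) :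
    ∀ (ts : List (Int × String × String)) (d : PySem.Dict String (PySem.Dict String (List Int))),
    (ts.foldl (fun d t => d.modify t.2.1 PySem.Dict.empty
          (fun inner => inner.modify t.2.2 [] (fun l => l ++ [t.1 - 1]))) d).getD p PySem.Dict.empty
      = (ts.filter (fun t => t.2.1 == p)).foldl
          (fun inner t => inner.modify t.2.2 [] (fun l => l ++ [t.1 - 1]))
          (d.getD p PySem.Dict.empty) := by
  intro ts
  induction ts with
  | nil => intro d; simp
  | cons t rest ih =>
      intro d
      simp only [List.foldl_cons, List.filter_cons]
      by_cases h : t.2.1 = p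
      · subst h
        simp only [BEq.rfl, if_true, List.foldl_cons]
        rw [ih, PySem.Dict.getD_modify, if_pos rfl]
      · have hb : (t.2.1 == p) = false := by simpa using h
        simp only [hb, Bool.false_eq_true, if_false]
        rw [ih, PySem.Dict.getD_modify, if_neg (fun hc => h hc.symm)]

-- pushing the filter/map through the (key, payload) projection
theorem push_filter_map (us : List (Int × String × String)) (w : String) :
    ((us.map (fun t => (t.2.2, t.1 - 1))).filter (fun q => q.1 == w)).map (fun q => q.2)
      = (us.filter (fun t => t.2.2 == w)).map (fun t => t.1 - 1) := by
  induction us with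
  | nil => rfl
  | cons t rest ih => by_cases h : (t.2.2 == w) = true <;> simp [h, ih]

-- reading the first/second components of enumerated pairs
theorem conv_a : ∀ (L : List (String × String)) (s : Int),
    (PySem.List.enumerate L s).map (fun t => t.2.1) = L.map (fun pw => pw.1) := by
  intro L
  induction L with
  | nil => intro s; simp [PySem.List.enumerate_nil]
  | cons x rest ih => intro s; simp [PySem.List.enumerate_cons, ih (s + 1)]

theorem conv_b (p : String) : ∀ (L : List (String × String)) (s : Int),
    ((PySem.List.enumerate L s).filter (fun t => t.2.1 == p)).map (fun t => t.2.2)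
      = (L.filter (fun pw => pw.1 == p)).map (fun pw => pw.2) := by
  intro L
  induction L with
  | nil => intro s; simp [PySem.List.enumerate_nil]
  | cons x rest ih =>
      intro s
      by_cases h : (x.1 == p) = true <;>
        simp [PySem.List.enumerate_cons, h, ih (s + 1)]

theorem conv_a0 (L : List (String × String)) :
    (PySem.List.enumerate L 0).map (fun t => t.2.1) = L.map (fun pw => pw.1) := conv_a L 0

theorem conv_b0 (p : String) (L : List (String × String)) :
    ((PySem.List.enumerate L 0).filter (fun t => t.2.1 == p)).map (fun t => t.2.2)
      = (L.filter (fun pw => pw.1 == p)).map (fun pw => pw.2) := conv_b p L 0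

-- main lemma: the nested-modify fold, read back as nested lists, is the group-by
theorem main_lemma (ts : List (Int × String × String)) :
    ((ts.foldl (fun d t => d.modify t.2.1 PySem.Dict.empty
          (fun inner => inner.modify t.2.2 [] (fun l => l ++ [t.1 - 1])))
        PySem.Dict.empty).items.map (fun kv => (kv.1, kv.2.items)))
      = (PySem.List.dedup (ts.map (fun t => t.2.1))).map (fun p =>
          (p, (PySem.List.dedup ((ts.filter (fun t => t.2.1 == p)).map (fun t => t.2.2))).map
            (fun w => (w, (ts.filter (fun t => t.2.1 == p && t.2.2 == w)).map
              (fun t => t.1 - 1))))) := by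
  have hkeysO : (ts.foldl (fun d t => d.modify t.2.1 PySem.Dict.empty
        (fun inner => inner.modify t.2.2 [] (fun l => l ++ [t.1 - 1])))
      PySem.Dict.empty).keys = PySem.List.dedup (ts.map (fun t => t.2.1)) := by
    rw [PySem.Dict.keys_foldl_modify_key]
    simp [PySem.Set.update_nil_left]
  have hnodO : (ts.foldl (fun d t => d.modify t.2.1 PySem.Dict.empty
        (fun inner => inner.modify t.2.2 [] (fun l => l ++ [t.1 - 1])))
      PySem.Dict.empty).keys.Nodup := by
    rw [hkeysO]; exact PySem.List.nodup_dedup _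
  rw [PySem.Dict.items_eq_map_keys _ hnodO PySem.Dict.empty, hkeysO, List.map_map]
  apply List.map_congr_left
  intro p hp
  simp only [Function.comp_apply, Prod.mk.injEq, true_and]
  rw [getD_F p ts PySem.Dict.empty, PySem.Dict.getD_empty]
  set us := ts.filter (fun t => t.2.1 == p) with hus
  have hkeysI : (us.foldl (fun inner t => inner.modify t.2.2 [] (fun l => l ++ [t.1 - 1]))
      PySem.Dict.empty).keys = PySem.List.dedup (us.map (fun t => t.2.2)) := by
    rw [PySem.Dict.keys_foldl_modify_key]
    simp [PySem.Set.update_nil_left]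
  have hnodI : (us.foldl (fun inner t => inner.modify t.2.2 [] (fun l => l ++ [t.1 - 1]))
      PySem.Dict.empty).keys.Nodup := by
    rw [hkeysI]; exact PySem.List.nodup_dedup _
  rw [PySem.Dict.items_eq_map_keys _ hnodI ([] : List Int), hkeysI]
  apply List.map_congr_left
  intro w hw
  simp only [Prod.mk.injEq, true_and]
  -- value at w: rewrite the inner fold as a fold over (key, payload) pairs and use the library lemma
  have hfold : (us.foldl (fun inner t => inner.modify t.2.2 [] (fun l => l ++ [t.1 - 1]))
        PySem.Dict.empty)
      = ((us.map (fun t => (t.2.2, t.1 - 1))).foldl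
          (fun d q => d.modify q.1 [] (fun l => l ++ [q.2])) PySem.Dict.empty) := by
    rw [List.foldl_map]
  rw [hfold, PySem.Dict.getD_foldl_modify_append, PySem.Dict.getD_empty, List.nil_append]
  rw [push_filter_map us w, hus, List.filter_filter]
  congr 1
  apply List.filter_congr
  intro t _
  exact Bool.and_comm _ _

-- reconcile B's filters/maps with the enumerate-level ones used in main_lemma
theorem beq_prod (x : String × String) (p w : String) :
    (x == (p, w)) = (x.1 == p && x.2 == w) := rfl

-- ===== VERDICT (by name: the statement is the Claim_ definition above) =====
theorem bag_of_bigrams_spec : Claim_equal_bag_of_bigrams := by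
  intro words _
  unfold Spec_bag_of_bigrams bag_of_bigrams bag_of_bigrams_alt
  simp only []
  rw [pairs_eq words]
  simp only [beq_prod]
  rw [← conv_a0]
  simp only [← conv_b0]
  rw [← main_lemma]
  have ht := thread (fun d i prev w => d.modify prev PySem.Dict.empty
      (fun inner => inner.modify w [] (fun l => l ++ [i - 1]))) words 0 PySem.Dict.empty ""
  beta_reduce at ht
  rw [← ht, PySem.List.enumerate_eq_map_pyRange words "", List.foldl_map, PySem.List.len_eq]
  congr 1
  congr 1
  congr 1
  congr 1
  funext st i
  simp only [step_eq]
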